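-- pv_equiv track=rewrite | github.com/stxent/wrlconv | vrml_import.py | calc_balance
-- ===== SOURCE A (Python) =====
-- def calc_balance(string, delta=None, openset=('[', '{'), closeset=(']', '}')):
--     balance, offset = 0, 0
--     update = False
--
--     for i, value in enumerate(string):
--         if value in openset:
--             balance += 1
--             update = False
--         if value in closeset:
--             balance -= 1
--             update = True
--         if update and delta is not None and balance >= delta:
--             offset = len(string) - i - 1
--             update = False
--     return (balance, offset)
-- ===== SOURCE B (Python) =====
-- def calc_balance(string, delta=None, openset=('[', '{'), closeset=(']', '}')):
--     # pass 1: total balance of the whole string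
--     total = 0
--     for c in string:
--         if c in openset:
--             total += 1
--         if c in closeset:
--             total -= 1
--     # pass 2 (only if delta given): scan backwards keeping the running prefix
--     # balance; stop at the first (i.e. last) closing char whose balance >= delta
--     offset = 0
--     if delta is not None:
--         bal = total
--         for i in range(len(string) - 1, -1, -1):
--             c = string[i]
--             if c in closeset and bal >= delta:
--                 offset = len(string) - i - 1
--                 break
--             if c in openset:
--                 bal -= 1
--             if c in closeset:
--                 bal += 1
--     return (total, offset)
-- ===== Notes on version B (the rewrite author's own statement) =====
-- stated objective: alternative
-- what changed: Replaces the single forward loop with a carried update-flag by two separate passes: one pass summing the total balance, then (only when delta is given) a backward scan with early exit that maintains the running prefix balance and stops at the last qualifying closing character.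
import Mathlib
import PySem

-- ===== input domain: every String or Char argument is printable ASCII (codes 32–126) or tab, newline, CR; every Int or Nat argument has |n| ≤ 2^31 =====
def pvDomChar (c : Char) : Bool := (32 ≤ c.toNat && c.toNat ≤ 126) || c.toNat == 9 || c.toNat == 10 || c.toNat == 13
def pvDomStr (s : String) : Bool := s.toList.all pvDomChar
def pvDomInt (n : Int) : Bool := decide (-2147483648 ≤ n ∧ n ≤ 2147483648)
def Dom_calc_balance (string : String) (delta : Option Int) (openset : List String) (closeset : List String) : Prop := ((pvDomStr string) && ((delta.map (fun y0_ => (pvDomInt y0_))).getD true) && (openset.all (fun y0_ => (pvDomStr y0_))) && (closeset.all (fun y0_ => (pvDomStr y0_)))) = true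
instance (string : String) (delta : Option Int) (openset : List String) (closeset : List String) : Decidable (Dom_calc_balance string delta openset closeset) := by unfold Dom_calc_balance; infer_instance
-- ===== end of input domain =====

-- B replaces A's single forward loop with a flag by a total-balance pass plus a
-- backward early-exit scan (alternative decomposition, same asymptotic cost).

-- ===== PORT A =====
-- one iteration of A's for-loop body (state = (balance, offset, update))
def calcStep (n : Nat) (delta : Option Int) (openset closeset : List String)
    (s : Int × Int × Bool) (p : Int × Char) : Int × Int × Bool :=
  let b1 := if p.2.toString ∈ openset then s.1 + 1 else s.1
  let u1 := if p.2.toString ∈ openset then false else s.2.2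
  let b2 := if p.2.toString ∈ closeset then b1 - 1 else b1
  let u2 := if p.2.toString ∈ closeset then true else u1
  if u2 && (match delta with | some d => decide (d ≤ b2) | none => false) then
    (b2, (n : Int) - p.1 - 1, false)
  else
    (b2, s.2.1, u2)

def calc_balance (string : String) (delta : Option Int) (openset : List String) (closeset : List String) : Int × Int :=
  let l := string.toList
  let st := (PySem.List.enumerate l 0).foldl (calcStep l.length delta openset closeset) (0, 0, false)
  (st.1, st.2.1)

-- ===== PORT B =====
-- backward scan of Source B: list is the reversed enumerate, bal the running prefix balance
def altScan (d : Int) (openset closeset : List String) (n : Nat) :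
    List (Int × Char) → Int → Int
  | [], _ => 0
  | (i, c) :: rest, bal =>
    if c.toString ∈ closeset ∧ d ≤ bal then
      (n : Int) - i - 1
    else
      let bal1 := if c.toString ∈ openset then bal - 1 else bal
      let bal2 := if c.toString ∈ closeset then bal1 + 1 else bal1
      altScan d openset closeset n rest bal2

def calc_balance_alt (string : String) (delta : Option Int) (openset : List String) (closeset : List String) : Int × Int :=
  let l := string.toList
  let total := l.foldl (fun b c =>
    let b1 := if c.toString ∈ openset then b + 1 else b
    if c.toString ∈ closeset then b1 - 1 else b1) 0
  let offset : Int := match delta with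
    | none => 0
    | some d => altScan d openset closeset l.length (PySem.List.enumerate l 0).reverse total
  (total, offset)

-- ===== PRECONDITION & SPEC =====
def Spec_calc_balance (string : String) (delta : Option Int) (openset : List String) (closeset : List String) (out : Int × Int) : Prop := out = calc_balance_alt string delta openset closeset
instance (string : String) (delta : Option Int) (openset : List String) (closeset : List String) (out : Int × Int) : Decidable (Spec_calc_balance string delta openset closeset out) := by unfold Spec_calc_balance; infer_instance

-- ===== CLAIM (what is proved, stated in full; the proofs are below) =====
def Claim_equal_calc_balance : Prop := ∀ (string : String) (delta : Option Int) (openset : List String) (closeset : List String), Dom_calc_balance string delta openset closeset → Spec_calc_balance string delta openset closeset (calc_balance string delta openset closeset)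

-- ===== LEMMAS AND PROOFS =====

-- net contribution of one character to the balance
def contrib (openset closeset : List String) (c : Char) : Int :=
  (if c.toString ∈ openset then 1 else 0) - (if c.toString ∈ closeset then 1 else 0)

def preBal (openset closeset : List String) (l : List Char) : Int :=
  (l.map (contrib openset closeset)).sum

theorem enum_contrib_sum (openset closeset : List String) (l : List Char) :
    ((PySem.List.enumerate l 0).map (fun p => contrib openset closeset p.2)).sum
      = preBal openset closeset l := by
  have h : (fun p : Int × Char => contrib openset closeset p.2)
      = (contrib openset closeset) ∘ Prod.snd := rfl
  rw [h, ← List.map_map, PySem.List.map_snd_enumerate, preBal]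

theorem totalB_eq (openset closeset : List String) (l : List Char) (b : Int) :
    l.foldl (fun b c =>
      let b1 := if c.toString ∈ openset then b + 1 else b
      if c.toString ∈ closeset then b1 - 1 else b1) b
    = b + preBal openset closeset l := by
  induction l generalizing b with
  | nil => simp [preBal]
  | cons c t ih =>
      simp only [List.foldl_cons, ih, preBal, List.map_cons, List.sum_cons, contrib]
      split_ifs <;> ring

theorem none_fold (openset closeset : List String) (n : Nat)
    (li : List (Int × Char)) (s : Int × Int × Bool) :
    (li.foldl (calcStep n none openset closeset) s).1
      = s.1 + ((li.map (fun p => contrib openset closeset p.2)).sum) ∧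
    (li.foldl (calcStep n none openset closeset) s).2.1 = s.2.1 := by
  induction li generalizing s with
  | nil => simp
  | cons p t ih =>
      simp only [List.foldl_cons]
      rcases ih (calcStep n none openset closeset s p) with ⟨h1, h2⟩
      simp only [List.map_cons, List.sum_cons]
      constructor
      · rw [h1]; simp only [calcStep, contrib]
        split_ifs <;> simp_all <;> ring
      · rw [h2]; simp only [calcStep]
        split_ifs <;> simp_all

theorem main_fold (openset closeset : List String) (d : Int) (n : Nat) (l : List Char) :
    ((PySem.List.enumerate l 0).foldl (calcStep n (some d) openset closeset) (0, 0, false)).1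
      = preBal openset closeset l ∧
    ((PySem.List.enumerate l 0).foldl (calcStep n (some d) openset closeset) (0, 0, false)).2.1
      = altScan d openset closeset n (PySem.List.enumerate l 0).reverse (preBal openset closeset l) ∧
    ((((PySem.List.enumerate l 0).foldl (calcStep n (some d) openset closeset) (0, 0, false)).2.2
        && decide (d ≤ ((PySem.List.enumerate l 0).foldl (calcStep n (some d) openset closeset) (0, 0, false)).1)) = false) := by
  induction l using List.reverseRecOn with
  | nil => simp [preBal, altScan, PySem.List.enumerate]
  | append_singleton xs c ih =>
      obtain ⟨ihb, iho, ihu⟩ := ih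
      have he : PySem.List.enumerate (xs ++ [c]) 0
          = PySem.List.enumerate xs 0 ++ [((xs.length : Int), c)] := by
        rw [PySem.List.enumerate_append]
        simp [PySem.List.enumerate]
      have hp : preBal openset closeset (xs ++ [c])
          = preBal openset closeset xs + contrib openset closeset c := by
        simp [preBal]
      rw [he, List.foldl_append, List.reverse_append, hp]
      simp only [List.foldl_cons, List.foldl_nil, List.reverse_cons, List.reverse_nil,
        List.nil_append, List.singleton_append, altScan, calcStep]
      by_cases hc : String.singleton c ∈ closeset <;> by_cases ho : String.singleton c ∈ openset
      · split_ifs <;> simp_all [contrib] <;> omega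
      · split_ifs <;> simp_all [contrib] <;> omega
      · split_ifs <;> simp_all [contrib] <;> omega
      · have ihu' : (((PySem.List.enumerate xs 0).foldl (calcStep n (some d) openset closeset) (0, 0, false)).2.2 && decide (d ≤ preBal openset closeset xs)) = false := by
          rw [← ihb]; exact ihu
        have hcond : ¬((List.foldl (calcStep n (some d) openset closeset) (0, 0, false) (PySem.List.enumerate xs)).2.2 = true ∧ d ≤ preBal openset closeset xs) := by
          rintro ⟨h1, h2⟩
          rw [h1] at ihu'
          simp [h2] at ihu'
        simp [hc, ho, contrib, ihb, iho, ihu']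

-- ===== VERDICT (by name: the statement is the Claim_ definition above) =====
theorem calc_balance_spec : Claim_equal_calc_balance := by
  intro string delta openset closeset _
  unfold Spec_calc_balance calc_balance calc_balance_alt
  simp only [totalB_eq, Int.zero_add]
  cases delta with
  | none =>
      rcases none_fold openset closeset string.length
        (PySem.List.enumerate string.toList 0) (0, 0, false) with ⟨h1, h2⟩
      rw [enum_contrib_sum] at h1
      refine Prod.ext ?_ ?_
      · simpa using h1
      · simpa using h2
  | some d =>
      rcases main_fold openset closeset d string.length string.toList with ⟨h1, h2, _⟩
      exact Prod.ext (by simpa using h1) (by simpa using h2)
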